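-- pv_equiv track=rewrite | github.com/bhushanwalke/codefights | sumitup.py | SumItUp
-- ===== SOURCE A (Python) =====
-- def SumItUp(n, k):
--     sum = 0
--     for r in range(1, k+1):
--         res = r
--         for j in range(1, n+1):
--             f = r+j
--             res = res * f
--         sum += res
--     return sum
-- ===== SOURCE B (Python) =====
-- def SumItUp(n, k):
--     # Telescoping closed form: sum_{r=1}^{k} r(r+1)...(r+n) = (prod_{i=0}^{m+1} (k+i)) // (m+2), m = max(n,0)
--     if k <= 0:
--         return 0
--     m = n if n > 0 else 0
--     prod = 1
--     for i in range(m + 2):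
--         prod *= k + i
--     return prod // (m + 2)
-- ===== Notes on version B (the rewrite author's own statement) =====
-- stated objective: faster
-- what changed: Replaced the O(n*k) double loop with the telescoping closed form sum_{r=1}^{k} r(r+1)...(r+n) = (prod_{i=0}^{m+1}(k+i)) // (m+2), m = max(n,0): one O(n) product and an exact integer division.
import Mathlib
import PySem

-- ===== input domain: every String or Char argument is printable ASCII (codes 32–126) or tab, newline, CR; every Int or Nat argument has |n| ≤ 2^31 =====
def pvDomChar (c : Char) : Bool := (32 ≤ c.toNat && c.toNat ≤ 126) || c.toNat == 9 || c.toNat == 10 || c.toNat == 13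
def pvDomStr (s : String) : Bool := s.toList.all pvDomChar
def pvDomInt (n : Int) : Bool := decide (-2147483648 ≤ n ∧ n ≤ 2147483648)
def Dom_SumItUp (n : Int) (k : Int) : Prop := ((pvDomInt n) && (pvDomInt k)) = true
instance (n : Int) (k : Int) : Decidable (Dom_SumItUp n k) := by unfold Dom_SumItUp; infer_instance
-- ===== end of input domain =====

-- B replaces A's O(n·k) double loop by the telescoping closed form
-- (∏_{i=0}^{m+1}(k+i)) // (m+2) with m = max(n,0): a single O(n) product (objective: faster, asymptotic).

-- ===== PORT A =====
def SumItUp (n : Int) (k : Int) : Int :=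
  (PySem.List.pyRange 1 (k + 1) 1).foldl
    (fun sum r =>
      sum + (PySem.List.pyRange 1 (n + 1) 1).foldl (fun res j => res * (r + j)) r)
    0

-- ===== PORT B =====
def SumItUp_alt (n : Int) (k : Int) : Int :=
  if k ≤ 0 then 0
  else
    let m : Int := if n > 0 then n else 0
    let prod := (PySem.List.pyRange 0 (m + 2) 1).foldl (fun p i => p * (k + i)) 1
    PySem.Int.floordiv prod (m + 2)

-- ===== PRECONDITION & SPEC =====
def Spec_SumItUp (n : Int) (k : Int) (out : Int) : Prop := out = SumItUp_alt n k
instance (n : Int) (k : Int) (out : Int) : Decidable (Spec_SumItUp n k out) := by unfold Spec_SumItUp; infer_instance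

-- ===== CLAIM (what is proved, stated in full; the proofs are below) =====
def Claim_equal_SumItUp : Prop := ∀ (n : Int) (k : Int), Dom_SumItUp n k → Spec_SumItUp n k (SumItUp n k)

-- ===== LEMMAS AND PROOFS =====

/-- Rising product: rise r t = r·(r+1)·…·(r+t-1). -/
def rise (r : Int) : Nat → Int
  | 0 => 1
  | t + 1 => rise r t * (r + t)

theorem rise_shift (r : Int) (t : Nat) : rise r (t + 1) = r * rise (r + 1) t := by
  induction t with
  | zero => simp [rise]
  | succ t ih =>
    show rise r (t + 1) * (r + (t + 1 : Nat)) = r * (rise (r + 1) t * ((r + 1) + t))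
    rw [ih]; push_cast; ring

theorem foldl_rise (b a c : Int) (t : Nat) :
    (PySem.List.pyRange a (a + t) 1).foldl (fun p i => p * (b + i)) c = c * rise (b + a) t := by
  induction t with
  | zero => simp [rise]
  | succ t ih =>
    have h : a + ((t : Int) + 1) = (a + t) + 1 := by ring
    rw [show ((t + 1 : Nat) : Int) = (t : Int) + 1 by push_cast; ring, h,
      PySem.List.pyRange_one_succ_right (by omega), List.foldl_append, ih]
    show c * rise (b + a) t * (b + (a + t)) = c * rise (b + a) (t + 1)
    show _ = c * (rise (b + a) t * ((b + a) + t))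
    ring

theorem innerA (r n : Int) :
    (PySem.List.pyRange 1 (n + 1) 1).foldl (fun res j => res * (r + j)) r
      = rise r (n.toNat + 1) := by
  by_cases hn : 0 ≤ n
  · have h1 : n + 1 = 1 + (n.toNat : Int) := by omega
    rw [h1, foldl_rise r 1 r n.toNat, rise_shift]
  · rw [PySem.List.pyRange_one_eq_nil (by omega)]
    have : n.toNat = 0 := by omega
    simp [this, rise]

/-- aSum m c = ∑_{r=1}^{c} rise r (m+1). -/
def aSum (m : Nat) : Nat → Int
  | 0 => 0
  | c + 1 => aSum m c + rise ((c : Int) + 1) (m + 1)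

theorem outerA (n : Int) (c : Nat) :
    (PySem.List.pyRange 1 (1 + c) 1).foldl
      (fun sum r =>
        sum + (PySem.List.pyRange 1 (n + 1) 1).foldl (fun res j => res * (r + j)) r)
      0 = aSum n.toNat c := by
  induction c with
  | zero => simp [PySem.List.pyRange_one_eq_nil, aSum]
  | succ c ih =>
    rw [show (1 : Int) + ((c + 1 : Nat) : Int) = (1 + (c : Int)) + 1 by push_cast; ring,
      PySem.List.pyRange_one_succ_right (a := 1) (b := 1 + (c : Int)) (by omega),
      List.foldl_append, ih]
    show aSum n.toNat c + _ = aSum n.toNat (c + 1)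
    rw [innerA (1 + (c : Int)) n]
    show _ = aSum n.toNat c + rise ((c : Int) + 1) (n.toNat + 1)
    rw [show (1 : Int) + (c : Int) = (c : Int) + 1 by ring]

theorem tel (m c : Nat) : ((m : Int) + 2) * aSum m c = rise (c : Int) (m + 2) := by
  induction c with
  | zero =>
    have : rise (0 : Int) (m + 2) = 0 := by rw [rise_shift]; ring
    simp [aSum, this]
  | succ c ih =>
    have step : rise ((c : Int) + 1) (m + 2)
        = rise (c : Int) (m + 2) + ((m : Int) + 2) * rise ((c : Int) + 1) (m + 1) := by
      have h1 : rise ((c : Int) + 1) (m + 2) = rise ((c : Int) + 1) (m + 1) * (((c : Int) + 1) + ((m : Nat) + 1 : Nat)) := rfl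
      have h2 : rise (c : Int) (m + 2) = (c : Int) * rise ((c : Int) + 1) (m + 1) := rise_shift _ _
      rw [h1, h2]; push_cast; ring
    show ((m : Int) + 2) * (aSum m c + rise ((c : Int) + 1) (m + 1)) = rise ((c + 1 : Nat) : Int) (m + 2)
    rw [show ((c + 1 : Nat) : Int) = (c : Int) + 1 by push_cast; ring, step, ← ih]; ring

-- ===== VERDICT (by name: the statement is the Claim_ definition above) =====
theorem SumItUp_spec : Claim_equal_SumItUp := by
  intro n k _
  show SumItUp n k = SumItUp_alt n k
  unfold SumItUp SumItUp_alt
  by_cases hk : k ≤ 0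
  · rw [if_pos hk, PySem.List.pyRange_one_eq_nil (a := 1) (b := k + 1) (by omega)]; rfl
  · rw [if_neg hk]
    have hk1 : k + 1 = 1 + (k.toNat : Int) := by omega
    rw [hk1, outerA n k.toNat]
    have hm : (if n > 0 then n else 0) = (n.toNat : Int) := by
      split_ifs with h <;> omega
    have hprod : rise k (n.toNat + 2) = ((n.toNat : Int) + 2) * aSum n.toNat k.toNat := by
      rw [tel, show ((k.toNat : Nat) : Int) = k from by omega]
    simp only [hm]
    conv_rhs => rw [show ((n.toNat : Int) + 2) = 0 + ((n.toNat + 2 : Nat) : Int) from by push_cast; ring]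
    rw [foldl_rise k 0 1 (n.toNat + 2), one_mul, show k + 0 = k from by ring, hprod,
      PySem.Int.floordiv_eq_ediv_of_pos (by push_cast; omega),
      show (0 : Int) + ((n.toNat + 2 : Nat) : Int) = (n.toNat : Int) + 2 from by push_cast; ring,
      Int.mul_ediv_cancel_left _ (by omega)]
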